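-- pv_equiv track=rewrite | github.com/anvesh-lp/PythonClass | PythonAssignments/Anvesh_Kunuguntla_Assignment1.py | getSubstringsWithNoDubs
-- ===== SOURCE A (Python) =====
-- def getSubstringsWithNoDubs(iterable):
--     # initializing an Array
--     listOfSubStrings = []
--     for times in range(1, len(iterable) + 1):
--         for k in range(0, len(iterable) - times + 1):
--             # Getting the substring using slicing
--             subString = iterable[k:k + times]
--             # Adding the substring to the list after checking if its not already in the list
--             if subString not in listOfSubStrings:
--                 listOfSubStrings.append(subString)
--     # Returning the final list
--
--     return listOfSubStrings
-- ===== SOURCE B (Python) =====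
-- def getSubstringsWithNoDubs(iterable):
--     n = len(iterable)
--     result = []
--     seen = set()
--     for i in range(n):
--         for j in range(i + 1, n + 1):
--             sub = iterable[i:j]
--             if sub not in seen:
--                 seen.add(sub)
--                 result.append(sub)
--     return sorted(result, key=len)
-- ===== Notes on version B (the rewrite author's own statement) =====
-- stated objective: faster
-- what changed: Generates substrings position-major with a hash-set dedup and restores the length-then-position order by a stable sort on length, instead of length-major generation with an O(m) list-membership scan per substring.
import Mathlib
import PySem

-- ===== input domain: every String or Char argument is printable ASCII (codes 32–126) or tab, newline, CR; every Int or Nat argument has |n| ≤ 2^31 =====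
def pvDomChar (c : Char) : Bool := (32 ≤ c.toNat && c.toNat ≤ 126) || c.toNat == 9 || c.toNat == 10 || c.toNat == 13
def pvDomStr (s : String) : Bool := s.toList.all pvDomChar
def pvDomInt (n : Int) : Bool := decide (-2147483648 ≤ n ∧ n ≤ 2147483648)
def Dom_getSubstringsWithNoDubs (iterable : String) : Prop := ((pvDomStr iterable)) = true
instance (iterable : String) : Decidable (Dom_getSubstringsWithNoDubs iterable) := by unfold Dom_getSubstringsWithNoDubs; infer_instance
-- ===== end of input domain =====

-- B generates substrings position-major with a set-based dedup and restores A's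
-- length-then-position order by a stable sort on length; A scans its result list
-- for every candidate substring, length-major.

-- ===== PORT A =====
def getSubstringsWithNoDubs (iterable : String) : List String :=
  (PySem.List.pyRange 1 (PySem.Str.len iterable + 1) 1).foldl
    (fun listOfSubStrings times =>
      (PySem.List.pyRange 0 (PySem.Str.len iterable - times + 1) 1).foldl
        (fun acc k =>
          let subString := PySem.Str.slice iterable (some k) (some (k + times))
          if subString ∈ acc then acc else acc ++ [subString])
        listOfSubStrings)
    []

-- ===== PORT B =====
def getSubstringsWithNoDubs_alt (iterable : String) : List String :=
  let n := PySem.Str.len iterable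
  let st :=
    (PySem.List.pyRange 0 n 1).foldl
      (fun (st : List String × PySem.Set String) i =>
        (PySem.List.pyRange (i + 1) (n + 1) 1).foldl
          (fun st j =>
            let sub := PySem.Str.slice iterable (some i) (some j)
            if PySem.Set.contains st.2 sub then st
            else (st.1 ++ [sub], PySem.Set.add st.2 sub))
          st)
      ([], PySem.Set.empty)
  PySem.List.sorted st.1 (fun s => PySem.Str.len s) false

-- ===== PRECONDITION & SPEC =====
def Spec_getSubstringsWithNoDubs (iterable : String) (out : List String) : Prop := out = getSubstringsWithNoDubs_alt iterable
instance (iterable : String) (out : List String) : Decidable (Spec_getSubstringsWithNoDubs iterable out) := by unfold Spec_getSubstringsWithNoDubs; infer_instance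

-- ===== CLAIM (what is proved, stated in full; the proofs are below) =====
def Claim_equal_getSubstringsWithNoDubs : Prop := ∀ (iterable : String), Dom_getSubstringsWithNoDubs iterable → Spec_getSubstringsWithNoDubs iterable (getSubstringsWithNoDubs iterable)

-- ===== LEMMAS AND PROOFS =====

-- A's list-membership append step, and B's (result, seen)-pair step.
def pvMemStep (a : List String) (x : String) : List String := if x ∈ a then a else a ++ [x]
def pvPairStep (st : List String × PySem.Set String) (x : String) : List String × PySem.Set String :=
  if PySem.Set.contains st.2 x then st else (st.1 ++ [x], PySem.Set.add st.2 x)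

-- the substring of length t starting at i
def pvSub (s : String) (i t : Nat) : String :=
  PySem.Str.slice s (some (i : Int)) (some ((i : Int) + (t : Int)))
-- all substrings of length t, by start position (A's inner loop, length-major)
def pvLenSeq (s : String) (t : Nat) : List String :=
  (List.range (s.toList.length - t + 1)).map (fun k => pvSub s k t)
-- all substrings, position-major (B's generation order)
def pvPosSeq (s : String) : List String :=
  (List.range s.toList.length).flatMap
    (fun i => (List.range (s.toList.length - i)).map (fun d => pvSub s i (d + 1)))

lemma pvSub_length (s : String) (i t : Nat) (h : i + t ≤ s.toList.length) :
    (pvSub s i t).toList.length = t := by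
  simp [pvSub, PySem.Str.toList_slice, PySem.Chars.slice_eq_listSlice,
    PySem.List.slice_natCast_add, String.length_toList]
  simp only [String.length_toList] at h
  omega

lemma pvMemStep_eq_add (a : List String) (x : String) : pvMemStep a x = PySem.Set.add a x := by
  simp [pvMemStep, PySem.Set.add, PySem.Set.contains, List.contains_iff_mem]

lemma foldl_memStep_eq_dedup (l : List String) :
    l.foldl pvMemStep [] = PySem.List.dedup l := by
  rw [PySem.List.dedup_eq_ofList, PySem.Set.ofList_eq_foldl]
  exact PySem.List.foldl_congr_mem l _ _ [] (fun a x _ => pvMemStep_eq_add a x)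

lemma foldl_memStep_extend (xs : List String) (acc0 : List String)
    (h : ∀ x ∈ xs, x ∉ acc0) (d : List String) :
    xs.foldl pvMemStep (acc0 ++ d) = acc0 ++ xs.foldl pvMemStep d := by
  induction xs generalizing d with
  | nil => simp
  | cons x xs ih =>
    have hx : x ∉ acc0 := h x (List.mem_cons_self ..)
    simp only [List.foldl_cons]
    by_cases hd : x ∈ d
    · rw [show pvMemStep (acc0 ++ d) x = acc0 ++ d by simp [pvMemStep, hd],
          show pvMemStep d x = d by simp [pvMemStep, hd]]
      exact ih (fun y hy => h y (List.mem_cons_of_mem _ hy)) d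
    · rw [show pvMemStep (acc0 ++ d) x = acc0 ++ (d ++ [x]) by
            simp [pvMemStep, hd, hx],
          show pvMemStep d x = d ++ [x] by simp [pvMemStep, hd]]
      exact ih (fun y hy => h y (List.mem_cons_of_mem _ hy)) (d ++ [x])

lemma foldl_pairStep (xs : List String) (d : List String) :
    xs.foldl pvPairStep (d, d) = (PySem.Set.update d xs, PySem.Set.update d xs) := by
  induction xs generalizing d with
  | nil => simp [PySem.Set.update]
  | cons x xs ih =>
    simp only [List.foldl_cons]
    have hstep : pvPairStep (d, d) x = (PySem.Set.add d x, PySem.Set.add d x) := by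
      by_cases h : x ∈ d <;>
        simp [pvPairStep, PySem.Set.add, PySem.Set.contains, h]
    rw [hstep, ih]
    simp only [PySem.Set.update, List.foldl_cons]

lemma dedup_append_singleton (l : List String) (x : String) :
    PySem.List.dedup (l ++ [x]) = PySem.Set.add (PySem.List.dedup l) x := by
  simp [PySem.List.dedup_eq_ofList, PySem.Set.ofList_eq_foldl, List.foldl_append]

lemma filter_add (s : List String) (x : String) (p : String → Bool) :
    (PySem.Set.add s x).filter p
      = if p x then PySem.Set.add (s.filter p) x else s.filter p := by
  by_cases hc : x ∈ s
  · have hs : PySem.Set.add s x = s := by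
      simp [PySem.Set.add, PySem.Set.contains, List.contains_iff_mem, hc]
    rw [hs]
    by_cases hp : p x
    · have hm : x ∈ s.filter p := List.mem_filter.mpr ⟨hc, hp⟩
      simp [hp, PySem.Set.add, PySem.Set.contains, List.contains_iff_mem, hm]
    · simp [hp]
  · have hs : PySem.Set.add s x = s ++ [x] := by
      simp [PySem.Set.add, PySem.Set.contains, hc]
    rw [hs, List.filter_append]
    by_cases hp : p x
    · have hm : x ∉ s.filter p := fun h => hc (List.mem_filter.mp h).1
      simp [hp, PySem.Set.add, PySem.Set.contains, hm]
    · simp [hp]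

lemma filter_dedup (l : List String) (p : String → Bool) :
    (PySem.List.dedup l).filter p = PySem.List.dedup (l.filter p) := by
  induction l using List.reverseRecOn with
  | nil => simp [PySem.List.dedup_eq_ofList, PySem.Set.ofList_eq_foldl]
  | append_singleton l x ih =>
    rw [dedup_append_singleton, filter_add, List.filter_append]
    by_cases hp : p x
    · rw [if_pos hp, show List.filter p [x] = [x] by simp [hp],
        dedup_append_singleton, ih]
    · rw [if_neg hp, show List.filter p [x] = [] by simp [hp], List.append_nil, ih]

lemma insertBy_not_before (b : String → String → Bool) (x : String) (l1 l2 : List String)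
    (h : ∀ y ∈ l1, b x y = false) :
    PySem.List.insertBy b x (l1 ++ l2) = l1 ++ PySem.List.insertBy b x l2 := by
  induction l1 with
  | nil => simp
  | cons y ys ih =>
    have hy : b x y = false := h y (List.mem_cons_self ..)
    simp only [List.cons_append]
    rw [show PySem.List.insertBy b x (y :: (ys ++ l2))
          = y :: PySem.List.insertBy b x (ys ++ l2) by simp [PySem.List.insertBy, hy]]
    rw [ih (fun z hz => h z (List.mem_cons_of_mem _ hz))]

lemma insertBy_all_before (b : String → String → Bool) (x : String) (l : List String)
    (h : ∀ y ∈ l, b x y = true) :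
    PySem.List.insertBy b x l = x :: l := by
  cases l with
  | nil => simp [PySem.List.insertBy]
  | cons y ys => simp [PySem.List.insertBy, h y (List.mem_cons_self ..)]

lemma flatMap_congr_mem (r : List Nat) (f g : Nat → List String)
    (h : ∀ t ∈ r, f t = g t) : r.flatMap f = r.flatMap g := by
  rw [List.flatMap_def, List.flatMap_def, List.map_congr_left h]

-- the stable sort by length is the concatenation of the per-length groups, in order
lemma sorted_len_groups (l : List String) (N : Nat) (h : ∀ y ∈ l, y.toList.length < N) :
    PySem.List.sorted l (fun s => PySem.Str.len s) false
      = (List.range N).flatMap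
          (fun t => l.filter (fun y => decide (y.toList.length = t))) := by
  induction l using List.reverseRecOn with
  | nil => simp [PySem.List.sorted_eq_foldl_insertBy]
  | append_singleton l x ih =>
    have h' : ∀ y ∈ l, y.toList.length < N := fun y hy => h y (by simp [hy])
    have hx : x.toList.length < N := h x (by simp)
    rw [PySem.List.sorted_eq_foldl_insertBy, List.foldl_append, List.foldl_cons,
      List.foldl_nil, ← PySem.List.sorted_eq_foldl_insertBy, ih h']
    have hb : ∀ u v : String,
        (decide (PySem.Str.len u < PySem.Str.len v))
          = decide (u.toList.length < v.toList.length) := by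
      intro u v
      simp [PySem.Str.len_eq]
    have hsplit : List.range N
        = List.range (x.toList.length + 1)
          ++ (List.range (N - (x.toList.length + 1))).map
               (fun j => (x.toList.length + 1) + j) := by
      rw [← List.range_add]
      congr 1
      omega
    rw [hsplit, List.flatMap_append, List.flatMap_append]
    rw [insertBy_not_before _ _ _ _ (by
      intro y hy
      rcases List.mem_flatMap.mp hy with ⟨t, ht, hyt⟩
      have htK : t < x.toList.length + 1 := List.mem_range.mp ht
      have hlen : y.toList.length = t := by
        have := (List.mem_filter.mp hyt).2
        exact of_decide_eq_true this
      rw [hb]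
      exact decide_eq_false (by omega))]
    rw [insertBy_all_before _ _ _ (by
      intro y hy
      rcases List.mem_flatMap.mp hy with ⟨t, ht, hyt⟩
      rcases List.mem_map.mp ht with ⟨j, _, rfl⟩
      have hlen : y.toList.length = x.toList.length + 1 + j := by
        have := (List.mem_filter.mp hyt).2
        exact of_decide_eq_true this
      rw [hb]
      exact decide_eq_true (by omega))]
    -- right part of the groups is unchanged by appending x
    have hA2 : ((List.range (N - (x.toList.length + 1))).map
          (fun j => (x.toList.length + 1) + j)).flatMap
            (fun t => (l ++ [x]).filter (fun y => decide (y.toList.length = t)))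
        = ((List.range (N - (x.toList.length + 1))).map
          (fun j => (x.toList.length + 1) + j)).flatMap
            (fun t => l.filter (fun y => decide (y.toList.length = t))) := by
      apply flatMap_congr_mem
      intro t ht
      dsimp only
      rcases List.mem_map.mp ht with ⟨j, _, rfl⟩
      rw [List.filter_append, show List.filter (fun y => decide (y.toList.length
        = x.toList.length + 1 + j)) [x] = [] by
          simp only [List.filter_cons, List.filter_nil]
          rw [show decide (x.toList.length = x.toList.length + 1 + j) = false from
            decide_eq_false (by omega)]
          simp, List.append_nil]
    -- left part gains x at the very end (its own length group is the last one)
    have hA1 : (List.range (x.toList.length + 1)).flatMap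
          (fun t => (l ++ [x]).filter (fun y => decide (y.toList.length = t)))
        = (List.range (x.toList.length + 1)).flatMap
            (fun t => l.filter (fun y => decide (y.toList.length = t))) ++ [x] := by
      rw [List.range_succ, List.flatMap_append, List.flatMap_append]
      rw [flatMap_congr_mem (List.range x.toList.length)
        (fun t => (l ++ [x]).filter (fun y => decide (y.toList.length = t)))
        (fun t => l.filter (fun y => decide (y.toList.length = t)))
        (by
          intro t ht
          dsimp only
          have := List.mem_range.mp ht
          rw [List.filter_append, show List.filter (fun y => decide (y.toList.length
            = t)) [x] = [] by
              simp only [List.filter_cons, List.filter_nil]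
              rw [show decide (x.toList.length = t) = false from
                decide_eq_false (by omega)]
              simp, List.append_nil])]
      simp only [List.flatMap_cons, List.flatMap_nil, List.append_nil]
      rw [List.filter_append, show List.filter (fun y => decide (y.toList.length
        = x.toList.length)) [x] = [x] by simp]
      simp [List.append_assoc]
    rw [hA1, hA2]
    simp

lemma filter_range_eq_single (m k : Nat) :
    (List.range m).filter (fun d => decide (d = k)) = if k < m then [k] else [] := by
  induction m with
  | zero => simp
  | succ m ih =>
    rw [List.range_succ, List.filter_append, ih]
    rcases lt_trichotomy k m with hlt | heq | hgt
    · rw [if_pos hlt, if_pos (by omega), show List.filter (fun d => decide (d = k)) [m]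
        = [] by simp; omega, List.append_nil]
    · subst heq
      rw [if_neg (lt_irrefl _), if_pos (by omega), List.nil_append]
      simp
    · rw [if_neg (by omega), if_neg (by omega), show List.filter
        (fun d => decide (d = k)) [m] = [] by simp; omega, List.append_nil]

lemma filter_flatMap (r : List Nat) (f : Nat → List String) (p : String → Bool) :
    (r.flatMap f).filter p = r.flatMap (fun a => (f a).filter p) := by
  induction r with
  | nil => simp
  | cons a r ih => simp [List.filter_append, ih]

lemma filter_pvPosSeq (s : String) (t : Nat) (h1 : 1 ≤ t) (h2 : t ≤ s.toList.length) :
    (pvPosSeq s).filter (fun y => decide (y.toList.length = t)) = pvLenSeq s t := by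
  unfold pvPosSeq pvLenSeq
  rw [filter_flatMap]
  rw [flatMap_congr_mem _ _
    (fun i => if t - 1 < s.toList.length - i then [pvSub s i t] else [])
    (by
      intro i hi
      dsimp only
      rw [List.filter_map]
      rw [List.filter_congr (q := fun d => decide (d = t - 1)) (by
        intro d hd
        have hdn := List.mem_range.mp hd
        simp only [Function.comp]
        rw [pvSub_length s i (d + 1) (by omega)]
        apply decide_eq_decide.mpr
        omega)]
      rw [filter_range_eq_single]
      by_cases hc : t - 1 < s.toList.length - i
      · rw [if_pos hc, if_pos hc]
        simp only [List.map_cons, List.map_nil]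
        congr 2
        omega
      · rw [if_neg hc, if_neg hc, List.map_nil])]
  have hsplit : List.range s.toList.length
      = List.range (s.toList.length - t + 1)
        ++ (List.range (t - 1)).map (fun j => (s.toList.length - t + 1) + j) := by
    rw [← List.range_add]
    congr 1
    omega
  rw [hsplit, List.flatMap_append]
  rw [flatMap_congr_mem _ _ (fun i => [pvSub s i t]) (by
    intro i hi
    dsimp only
    have := List.mem_range.mp hi
    rw [if_pos (by omega)])]
  rw [flatMap_congr_mem ((List.range (t - 1)).map (fun j => (s.toList.length - t + 1) + j))
    _ (fun _ => []) (by
    intro i hi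
    dsimp only
    rcases List.mem_map.mp hi with ⟨j, hj, rfl⟩
    have := List.mem_range.mp hj
    rw [if_neg (by omega)])]
  rw [show (List.flatMap (fun (_ : Nat) => ([] : List String))
      ((List.range (t - 1)).map (fun j => (s.toList.length - t + 1) + j))) = [] by simp]
  rw [List.append_nil]
  induction (List.range (s.toList.length - t + 1)) with
  | nil => rfl
  | cons a r ihr => simp_all

lemma mem_pvPosSeq_length (s : String) (y : String) (hy : y ∈ pvPosSeq s) :
    1 ≤ y.toList.length ∧ y.toList.length ≤ s.toList.length := by
  rcases List.mem_flatMap.mp hy with ⟨i, hi, hyi⟩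
  rcases List.mem_map.mp hyi with ⟨d, hd, rfl⟩
  have hin := List.mem_range.mp hi
  have hdn := List.mem_range.mp hd
  rw [pvSub_length s i (d + 1) (by omega)]
  omega

lemma mem_pvLenSeq_length (s : String) (t : Nat) (ht : t ≤ s.toList.length)
    (y : String) (hy : y ∈ pvLenSeq s t) : y.toList.length = t := by
  rcases List.mem_map.mp hy with ⟨k, hk, rfl⟩
  have := List.mem_range.mp hk
  exact pvSub_length s k t (by omega)

-- A is the global first-occurrence dedup of the length-major enumeration
lemma A_eq (s : String) :
    getSubstringsWithNoDubs s
      = PySem.List.dedup ((List.range s.toList.length).flatMap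
          (fun t' => pvLenSeq s (t' + 1))) := by
  unfold getSubstringsWithNoDubs
  rw [PySem.List.pyRange_one]
  simp only [PySem.Str.len_eq]
  rw [show ((s.toList.length : Int) + 1 - 1).toNat = s.toList.length by omega]
  rw [List.foldl_map]
  rw [PySem.List.foldl_congr_mem _ _
    (fun a t' => (pvLenSeq s (t' + 1)).foldl pvMemStep a) _ (by
      intro acc t' ht'
      dsimp only
      have htn := List.mem_range.mp ht'
      rw [PySem.List.pyRange_one]
      rw [show ((s.toList.length : Int) - (1 + (t' : Int)) + 1 - 0).toNat
            = s.toList.length - t' by omega]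
      rw [List.foldl_map]
      unfold pvLenSeq
      rw [show s.toList.length - (t' + 1) + 1 = s.toList.length - t' by omega]
      rw [List.foldl_map]
      apply PySem.List.foldl_congr_mem
      intro a k _
      show (if PySem.Str.slice s (some (0 + (k : Int))) (some (0 + (k : Int) + (1 + (t' : Int)))) ∈ a
            then a
            else a ++ [PySem.Str.slice s (some (0 + (k : Int))) (some (0 + (k : Int) + (1 + (t' : Int))))])
          = pvMemStep a (pvSub s k (t' + 1))
      rw [show PySem.Str.slice s (some (0 + (k : Int))) (some (0 + (k : Int) + (1 + (t' : Int))))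
            = pvSub s k (t' + 1) by
          unfold pvSub
          rw [show (0 + (k : Int)) = (k : Int) by ring]
          rw [show ((k : Int) + (1 + (t' : Int))) = (k : Int) + ((t' : Nat) + 1 : Nat) by
                push_cast; ring]]
      rfl)]
  rw [← List.foldl_flatMap, foldl_memStep_eq_dedup]

-- B's accumulator pair is (dedup of the position-major enumeration, its seen set)
lemma B_eq (s : String) :
    getSubstringsWithNoDubs_alt s
      = PySem.List.sorted (PySem.List.dedup (pvPosSeq s)) (fun x => PySem.Str.len x) false := by
  unfold getSubstringsWithNoDubs_alt
  simp only [PySem.Str.len_eq]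
  rw [PySem.List.pyRange_one]
  rw [show ((s.toList.length : Int) - 0).toNat = s.toList.length by omega]
  rw [List.foldl_map]
  rw [PySem.List.foldl_congr_mem _ _
    (fun (st : List String × PySem.Set String) i =>
      ((List.range (s.toList.length - i)).map (fun d => pvSub s i (d + 1))).foldl
        pvPairStep st) _ (by
      intro st i hi
      dsimp only
      have hin := List.mem_range.mp hi
      rw [PySem.List.pyRange_one]
      rw [show ((s.toList.length : Int) + 1 - (0 + (i : Int) + 1)).toNat
            = s.toList.length - i by omega]
      rw [List.foldl_map, List.foldl_map]
      apply PySem.List.foldl_congr_mem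
      intro a d _
      show (if PySem.Set.contains a.2 (PySem.Str.slice s (some (0 + (i : Int))) (some (0 + (i : Int) + 1 + (d : Int))))
            then a
            else (a.1 ++ [PySem.Str.slice s (some (0 + (i : Int))) (some (0 + (i : Int) + 1 + (d : Int)))],
                  PySem.Set.add a.2 (PySem.Str.slice s (some (0 + (i : Int))) (some (0 + (i : Int) + 1 + (d : Int))))))
          = pvPairStep a (pvSub s i (d + 1))
      rw [show PySem.Str.slice s (some (0 + (i : Int))) (some (0 + (i : Int) + 1 + (d : Int)))
            = pvSub s i (d + 1) by
          unfold pvSub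
          rw [show (0 + (i : Int)) = (i : Int) by ring]
          rw [show ((i : Int) + 1 + (d : Int)) = (i : Int) + ((d : Nat) + 1 : Nat) by
                push_cast; ring]]
      rfl)]
  rw [← List.foldl_flatMap]
  rw [show ((List.range s.toList.length).flatMap
        (fun i => (List.range (s.toList.length - i)).map (fun d => pvSub s i (d + 1))))
      = pvPosSeq s from rfl]
  rw [show (([], PySem.Set.empty) : List String × PySem.Set String)
        = (([] : List String), ([] : List String)) from rfl]
  rw [foldl_pairStep]
  rw [show PySem.Set.update ([] : List String) (pvPosSeq s)
        = PySem.List.dedup (pvPosSeq s) by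
      rw [PySem.List.dedup_eq_ofList, PySem.Set.ofList_eq_foldl]; rfl]

-- dedup of the length-major concatenation splits into per-length dedups
lemma dedup_flatMap_lenSeq (s : String) (m : Nat) (hm : m ≤ s.toList.length) :
    PySem.List.dedup ((List.range m).flatMap (fun t' => pvLenSeq s (t' + 1)))
      = (List.range m).flatMap (fun t' => PySem.List.dedup (pvLenSeq s (t' + 1))) := by
  induction m with
  | zero => simp [PySem.List.dedup_eq_ofList, PySem.Set.ofList_eq_foldl]
  | succ m ih =>
    rw [List.range_succ, List.flatMap_append, List.flatMap_append]
    simp only [List.flatMap_cons, List.flatMap_nil, List.append_nil]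
    rw [← foldl_memStep_eq_dedup, List.foldl_append, foldl_memStep_eq_dedup,
      ih (by omega)]
    rw [← List.append_nil ((List.range m).flatMap
      (fun t' => PySem.List.dedup (pvLenSeq s (t' + 1))))]
    rw [foldl_memStep_extend _ _ (by
      intro x hx hmem
      rcases List.mem_flatMap.mp hmem with ⟨t', ht', hxt'⟩
      have htm := List.mem_range.mp ht'
      have hx1 : x.toList.length = m + 1 :=
        mem_pvLenSeq_length s (m + 1) (by omega) x hx
      have hx2 : x.toList.length = t' + 1 :=
        mem_pvLenSeq_length s (t' + 1) (by omega) x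
          ((PySem.List.mem_dedup _ _).mp hxt')
      omega) []]
    rw [foldl_memStep_eq_dedup, List.append_nil]

theorem pv_main (s : String) :
    getSubstringsWithNoDubs s = getSubstringsWithNoDubs_alt s := by
  rw [A_eq, B_eq]
  rw [sorted_len_groups (PySem.List.dedup (pvPosSeq s)) (s.toList.length + 1) (by
    intro y hy
    have := mem_pvPosSeq_length s y ((PySem.List.mem_dedup _ _).mp hy)
    omega)]
  rw [show (List.range (s.toList.length + 1)).flatMap
        (fun t => (PySem.List.dedup (pvPosSeq s)).filter
          (fun y => decide (y.toList.length = t)))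
      = (List.range (s.toList.length + 1)).flatMap
        (fun t => PySem.List.dedup ((pvPosSeq s).filter
          (fun y => decide (y.toList.length = t))))
    from flatMap_congr_mem _ _ _ (fun t _ => filter_dedup _ _)]
  rw [List.range_succ_eq_map]
  simp only [List.flatMap_cons]
  rw [show ((pvPosSeq s).filter (fun y => decide (y.toList.length = 0))) = [] by
    rw [List.filter_eq_nil_iff]
    intro y hy
    have := mem_pvPosSeq_length s y hy
    simp only [decide_eq_true_eq]
    omega]
  rw [show PySem.List.dedup ([] : List String) = [] from by
    simp [PySem.List.dedup_eq_ofList, PySem.Set.ofList_eq_foldl]]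
  rw [List.nil_append, List.flatMap_map, dedup_flatMap_lenSeq s s.toList.length le_rfl]
  exact flatMap_congr_mem _ _ _ (fun t' ht' => by
    have := List.mem_range.mp ht'
    exact (congrArg PySem.List.dedup
      (filter_pvPosSeq s (t' + 1) (by omega) (by omega))).symm)

-- ===== VERDICT (by name: the statement is the Claim_ definition above) =====
theorem getSubstringsWithNoDubs_spec : Claim_equal_getSubstringsWithNoDubs := by
  intro iterable _
  unfold Spec_getSubstringsWithNoDubs
  exact pv_main iterable
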